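-- pv_equiv track=rewrite | github.com/mrseanryan/gpt-workflow | json_fixer.py | try_add_missing_quotes
-- ===== SOURCE A (Python) =====
-- def try_add_missing_quotes(rsp):
--     # rsp almost valid, but no quotes on the keys!
--     #example:
--     #     {
--     # bot_name: "Document Creator Bot",
--     # command_name: "Create Document",
--     # message_to_user: "What type of document would you like to create? Text, Image, or Spreadsheet?",
--     # document_type: None
--     # }
--     new_rsp = ""
--     split_by_space = rsp.split(" ")
--     for x in split_by_space:
--         if x.endswith(':'):
--             x = f'"{x}":'
--         new_rsp += x + " "
--     return new_rsp
-- ===== SOURCE B (Python) =====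
-- def try_add_missing_quotes(rsp):
--     # One streaming pass over the characters: no split() list, no token list;
--     # a sentinel space flushes the final token.
--     out = ""
--     tok = ""
--     for ch in rsp + " ":
--         if ch == ' ':
--             if tok.endswith(':'):
--                 out += '"' + tok + '": '
--             else:
--                 out += tok + ' '
--             tok = ""
--         else:
--             tok += ch
--     return out
-- ===== Notes on version B (the rewrite author's own statement) =====
-- stated objective: alternative
-- what changed: B replaces A's split-into-a-token-list-then-loop with a single streaming character pass that buffers the current token and flushes it (quoted if it ends in ':') at each space, a sentinel space flushing the last token.
import Mathlib
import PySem

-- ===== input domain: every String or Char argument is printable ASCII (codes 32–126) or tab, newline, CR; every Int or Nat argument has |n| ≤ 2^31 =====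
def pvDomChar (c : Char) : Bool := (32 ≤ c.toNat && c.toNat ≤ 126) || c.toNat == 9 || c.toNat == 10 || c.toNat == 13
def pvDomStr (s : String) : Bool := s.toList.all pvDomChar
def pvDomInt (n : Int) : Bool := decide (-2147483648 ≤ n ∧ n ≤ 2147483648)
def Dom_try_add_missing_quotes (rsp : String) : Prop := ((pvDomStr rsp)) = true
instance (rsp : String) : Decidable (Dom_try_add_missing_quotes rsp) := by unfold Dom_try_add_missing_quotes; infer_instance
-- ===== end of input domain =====

-- B does one streaming character pass with a token buffer instead of A's split-then-loop; same output (alternative decomposition, not claimed faster).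

-- ===== PORT A =====
def try_add_missing_quotes (rsp : String) : String :=
  -- rsp.split(" "): the separator " " is nonempty, so split? is always `some`
  let split_by_space := (PySem.Str.split? rsp " ").getD []
  split_by_space.foldl
    (fun new_rsp x =>
      let x := if PySem.Str.endswith x ":" then "\"" ++ x ++ "\":" else x
      new_rsp ++ x ++ " ") ""

-- ===== PORT B =====
-- the `for ch in rsp + " "` loop of Source B, state (out, tok)
def pvAltLoop : List Char → String → String → String
  | [], out, _tok => out
  | c :: cs, out, tok =>
    if c = ' ' then
      pvAltLoop cs (out ++ (if PySem.Str.endswith tok ":" then "\"" ++ tok ++ "\": " else tok ++ " ")) ""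
    else
      pvAltLoop cs out (tok ++ String.singleton c)

def try_add_missing_quotes_alt (rsp : String) : String :=
  pvAltLoop (rsp ++ " ").toList "" ""

-- ===== PRECONDITION & SPEC =====
def Spec_try_add_missing_quotes (rsp : String) (out : String) : Prop := out = try_add_missing_quotes_alt rsp
instance (rsp : String) (out : String) : Decidable (Spec_try_add_missing_quotes rsp out) := by unfold Spec_try_add_missing_quotes; infer_instance

-- ===== CLAIM (what is proved, stated in full; the proofs are below) =====
def Claim_equal_try_add_missing_quotes : Prop := ∀ (rsp : String), Dom_try_add_missing_quotes rsp → Spec_try_add_missing_quotes rsp (try_add_missing_quotes rsp)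

-- ===== LEMMAS AND PROOFS =====

-- what both programs append for one token
def pvEmit (t : List Char) : List Char :=
  if PySem.Chars.endswith t [':'] then '"' :: (t ++ ['"', ':', ' ']) else t ++ [' ']

-- split on single spaces (keeping empties), carrying the current partial token
def pvSplit (cur : List Char) : List Char → List (List Char)
  | [] => [cur]
  | c :: rest => if c = ' ' then cur :: pvSplit [] rest else pvSplit (cur ++ [c]) rest

lemma pvGoSpec (l : List Char) : ∀ (fuel : Nat) (cur : List Char) (acc : List (List Char)),
    l.length ≤ fuel →
    PySem.Chars.splitOn.go [' '] fuel l cur acc = acc.reverse ++ pvSplit cur.reverse l := by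
  induction l with
  | nil =>
    intro fuel cur acc _
    cases fuel <;> rw [PySem.Chars.splitOn.go.eq_def] <;> simp [pvSplit]
  | cons c rest ih =>
    intro fuel cur acc h
    cases fuel with
    | zero => simp at h
    | succ n =>
      rw [PySem.Chars.splitOn.go.eq_def]
      by_cases hc : c = ' '
      · simp only [hc, List.isPrefixOf, BEq.rfl, Bool.true_and, if_true, List.length_singleton, List.drop_one, List.tail_cons]
        rw [ih n [] (cur.reverse :: acc) (by simpa using h)]
        simp [pvSplit]
      · have hpre : [' '].isPrefixOf (c :: rest) = false := by
          simp [List.isPrefixOf]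
          exact fun hh => hc hh.symm
        simp only [hpre]
        rw [ih n (c :: cur) acc (by simpa using Nat.le_of_succ_le_succ h)]
        simp [pvSplit, hc]

lemma pvSplitOn_eq (s : List Char) : PySem.Chars.splitOn s [' '] = pvSplit [] s := by
  unfold PySem.Chars.splitOn
  simpa using pvGoSpec s (s.length + 1) [] [] (by omega)

lemma pvFoldA (toks : List (List Char)) : ∀ (acc : String),
    ((toks.map String.ofList).foldl
      (fun new_rsp x =>
        new_rsp ++ (if PySem.Str.endswith x ":" then "\"" ++ x ++ "\":" else x) ++ " ") acc).toList
      = acc.toList ++ (toks.map pvEmit).flatten := by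
  induction toks with
  | nil => intro acc; simp
  | cons t ts ih =>
    intro acc
    simp only [List.map_cons, List.foldl_cons, ih, List.flatten_cons]
    by_cases he : PySem.Chars.endswith t [':']
    · simp [pvEmit, he, String.toList_append]
    · simp [pvEmit, he, String.toList_append]

lemma pvAltB (cs : List Char) : ∀ (out tok : String),
    (pvAltLoop (cs ++ [' ']) out tok).toList
      = out.toList ++ ((pvSplit tok.toList cs).map pvEmit).flatten := by
  induction cs with
  | nil =>
    intro out tok
    simp only [List.nil_append, pvAltLoop, pvSplit]
    by_cases he : PySem.Chars.endswith tok.toList [':']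
    · simp [pvEmit, he, String.toList_append]
    · simp [pvEmit, he, String.toList_append]
  | cons c cs ih =>
    intro out tok
    by_cases hc : c = ' '
    · subst hc
      have step : pvAltLoop ((' ' :: cs) ++ [' ']) out tok
          = pvAltLoop (cs ++ [' '])
              (out ++ (if PySem.Str.endswith tok ":" then "\"" ++ tok ++ "\": " else tok ++ " ")) "" := by
        simp [pvAltLoop]
      rw [step, ih]
      by_cases he : PySem.Chars.endswith tok.toList [':'] <;>
        simp [pvSplit, pvEmit, he, String.toList_append]
    · simp only [List.cons_append, pvAltLoop, ih, pvSplit, hc, if_false,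
        String.toList_append, String.toList_singleton]

-- ===== VERDICT (by name: the statement is the Claim_ definition above) =====
theorem try_add_missing_quotes_spec : Claim_equal_try_add_missing_quotes := by
  intro rsp _
  show try_add_missing_quotes rsp = try_add_missing_quotes_alt rsp
  refine String.toList_inj.mp ?_
  have hsplit : (PySem.Str.split? rsp " ").getD [] = (pvSplit [] rsp.toList).map String.ofList := by
    simp [PySem.Str.split?, PySem.Chars.split?, pvSplitOn_eq]
  calc (try_add_missing_quotes rsp).toList
      = ((pvSplit [] rsp.toList).map pvEmit).flatten := by
        unfold try_add_missing_quotes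
        rw [hsplit, pvFoldA]
        rfl
    _ = (try_add_missing_quotes_alt rsp).toList := by
        unfold try_add_missing_quotes_alt
        have : (rsp ++ " ").toList = rsp.toList ++ [' '] := by
          simp [String.toList_append]
        rw [this, pvAltB]
        rfl
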